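-- pv_equiv track=rewrite | github.com/greenmapc/A-DS_course | python/a_star.py | reduce_point_stack
-- ===== SOURCE A (Python) =====
-- def reversed_index(arr, elem):
--     return list(reversed(arr)).index(elem)
--
-- def reduce_point_stack(stack):
--     # TODO reduce stack
--     index = 1
--     while index < len(stack):
--         elem = stack[index]
--         rev_index = reversed_index(stack, elem)
--         stack = stack[0:index] + [elem] + stack[len(stack) - rev_index:]
--         index += 1
--     return stack
-- ===== SOURCE B (Python) =====
-- def reduce_point_stack(stack):
--     # Precompute last occurrence of each element, then one forward pass that
--     # jumps from each element directly past its last occurrence (loop removal).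
--     last = {}
--     for i, e in enumerate(stack):
--         last[e] = i
--     if not stack:
--         return []
--     result = [stack[0]]
--     j = 1
--     while j < len(stack):
--         e = stack[j]
--         result.append(e)
--         j = last[e] + 1
--     return result
-- ===== Notes on version B (the rewrite author's own statement) =====
-- stated objective: faster
-- what changed: Replaces the quadratic while-loop that rebuilds the list and rescans a reversed copy at every step with a precomputed last-occurrence dictionary and a single forward pass whose index jumps past each element's last occurrence.
import Mathlib
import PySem

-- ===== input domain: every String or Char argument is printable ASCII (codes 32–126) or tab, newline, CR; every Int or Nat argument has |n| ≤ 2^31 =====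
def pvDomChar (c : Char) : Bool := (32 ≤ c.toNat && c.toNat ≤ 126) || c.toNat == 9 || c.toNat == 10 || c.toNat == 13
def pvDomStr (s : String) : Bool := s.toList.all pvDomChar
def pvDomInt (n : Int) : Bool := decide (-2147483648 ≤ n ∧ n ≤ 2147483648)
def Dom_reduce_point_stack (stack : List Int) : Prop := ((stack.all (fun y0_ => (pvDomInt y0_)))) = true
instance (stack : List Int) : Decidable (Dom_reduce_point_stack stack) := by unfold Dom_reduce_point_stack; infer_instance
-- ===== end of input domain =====

-- Re-implementation B replaces A's quadratic rebuild-and-rescan loop with a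
-- precomputed last-occurrence dictionary and one forward pass (faster).


-- ===== PORT A =====
-- reversed_index(arr, elem) = list(reversed(arr)).index(elem); none = ValueError
def reversed_index (arr : List Int) (elem : Int) : Option Nat :=
  PySem.List.index? arr.reverse elem

-- the 'while index < len(stack)' loop of A; the fuel only makes the recursion
-- total (one unit per iteration; the list never grows, so `stack.length` units
-- suffice) and the `none` fallbacks are unreachable (0 ≤ index < len(stack),
-- and elem occurs in stack, so .index never raises)
def aLoop : Nat → List Int → Nat → List Int
  | 0, stack, _ => stack
  | fuel + 1, stack, index =>
    if index < stack.length then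
      match PySem.List.pyGet? stack (index : Int) with
      | none => stack
      | some elem =>
        match reversed_index stack elem with
        | none => stack
        | some rev =>
          aLoop fuel
            (PySem.List.slice stack (some 0) (some (index : Int)) ++ [elem] ++
              PySem.List.slice stack (some ((stack.length : Int) - (rev : Int))) none)
            (index + 1)
    else stack

def reduce_point_stack (stack : List Int) : List Int :=
  aLoop stack.length stack 1

-- ===== PORT B =====
-- last = {}; for i, e in enumerate(stack): last[e] = i
def buildLast (stack : List Int) : PySem.Dict Int Int :=
  (PySem.List.enumerate stack).foldl (fun d p => d.insert p.2 p.1) PySem.Dict.empty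

-- the 'while j < len(stack)' loop of B; the fuel only makes the recursion total
-- (j strictly increases, so `stack.length` units suffice); the `none` fallbacks
-- are unreachable (0 ≤ j < len(stack), and e = stack[j] is a key of `last`)
def bLoop (stack : List Int) (last : PySem.Dict Int Int) : Nat → Int → List Int → List Int
  | 0, _, result => result
  | fuel + 1, j, result =>
    if j < (stack.length : Int) then
      match PySem.List.pyGet? stack j with
      | none => result
      | some e =>
        match last.get? e with
        | none => result
        | some L => bLoop stack last fuel (L + 1) (result ++ [e])
    else result

def reduce_point_stack_alt (stack : List Int) : List Int :=
  let last := buildLast stack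
  match stack with
  | [] => []
  | s0 :: _ => bLoop stack last stack.length 1 [s0]

-- ===== PRECONDITION & SPEC =====
def Spec_reduce_point_stack (stack : List Int) (out : List Int) : Prop := out = reduce_point_stack_alt stack
instance (stack : List Int) (out : List Int) : Decidable (Spec_reduce_point_stack stack out) := by unfold Spec_reduce_point_stack; infer_instance

-- ===== CLAIM (what is proved, stated in full; the proofs are below) =====
def Claim_equal_reduce_point_stack : Prop := ∀ (stack : List Int), Dom_reduce_point_stack stack → Spec_reduce_point_stack stack (reduce_point_stack stack)

-- ===== LEMMAS AND PROOFS =====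

-- index (from the front) of the LAST occurrence of x in l, if any
def lastOcc : List Int → Int → Option Nat
  | [], _ => none
  | a :: t, x =>
    match lastOcc t x with
    | some k => some (k + 1)
    | none => if a = x then some 0 else none

-- how far past position 0 the last occurrence of x reaches in x :: rest
def qOf (rest : List Int) (x : Int) : Nat :=
  match lastOcc rest x with
  | some k => k + 1
  | none => 0

-- common functional description of both loops: emit the head, skip past its
-- last occurrence, repeat
def greedy : List Int → List Int
  | [] => []
  | x :: rest => x :: greedy (rest.drop (qOf rest x))
termination_by l => l.length
decreasing_by simp only [List.length_drop, List.length_cons]; omega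

theorem greedy_nil : greedy [] = [] := by rw [greedy.eq_def]

theorem greedy_cons (x : Int) (rest : List Int) :
    greedy (x :: rest) = x :: greedy (rest.drop (qOf rest x)) := by rw [greedy.eq_def]

theorem lastOcc_some (l : List Int) (x : Int) (k : Nat) (h : lastOcc l x = some k) :
    k < l.length ∧ x ∈ l := by
  induction l generalizing k with
  | nil => simp [lastOcc] at h
  | cons a t ih =>
    simp only [lastOcc] at h
    cases ht : lastOcc t x with
    | some m =>
      rw [ht] at h
      obtain ⟨h1, h2⟩ := ih m ht
      simp only [Option.some.injEq] at h
      subst h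
      refine ⟨by simp only [List.length_cons]; omega, by simp [h2]⟩
    | none =>
      rw [ht] at h
      by_cases hax : a = x
      · simp [hax] at h; subst h; simp [hax]
      · simp [hax] at h

theorem lastOcc_none (l : List Int) (x : Int) (h : lastOcc l x = none) : x ∉ l := by
  induction l with
  | nil => simp
  | cons a t ih =>
    simp only [lastOcc] at h
    cases ht : lastOcc t x with
    | some m => rw [ht] at h; simp at h
    | none =>
      rw [ht] at h
      by_cases hax : a = x
      · simp [hax] at h
      · simp [Ne.symm hax]; exact ih ht

theorem lastOcc_cons_self (x : Int) (rest : List Int) :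
    lastOcc (x :: rest) x = some (qOf rest x) := by
  simp only [lastOcc, qOf]
  cases lastOcc rest x <;> simp

theorem lastOcc_append (l r : List Int) (x : Int) :
    lastOcc (l ++ r) x =
      match lastOcc r x with
      | some k => some (l.length + k)
      | none => lastOcc l x := by
  induction l with
  | nil => cases h : lastOcc r x <;> simp [lastOcc, h]
  | cons a t ih =>
    simp only [List.cons_append, lastOcc, ih]
    cases lastOcc r x with
    | some k => simp; omega
    | none => cases lastOcc t x <;> simp

-- .index on the reversed list finds the last occurrence
theorem index?_reverse (l : List Int) (x : Int) (k : Nat) (h : lastOcc l x = some k) :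
    PySem.List.index? l.reverse x = some (l.length - 1 - k) := by
  induction l generalizing k with
  | nil => simp [lastOcc] at h
  | cons a t ih =>
    simp only [lastOcc] at h
    cases ht : lastOcc t x with
    | some m =>
      rw [ht] at h
      simp at h
      subst h
      have hm := lastOcc_some t x m ht
      have hx : x ∈ t.reverse := by simp [hm.2]
      rw [List.reverse_cons, PySem.List.index?_append_of_mem _ hx, ih m ht]
      simp; omega
    | none =>
      rw [ht] at h
      by_cases hax : a = x
      · simp [hax] at h
        subst h hax
        have hx : a ∉ t.reverse := by simp [lastOcc_none t a ht]
        rw [List.reverse_cons, PySem.List.index?_append_singleton_self t.reverse a hx]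
        simp
      · simp [hax] at h

-- the dictionary built by B maps each element to its last-occurrence index
theorem buildLast_append (l : List Int) (a : Int) :
    buildLast (l ++ [a]) = (buildLast l).insert a (l.length : Int) := by
  simp [buildLast, PySem.List.enumerate_append, PySem.List.enumerate_cons,
    PySem.List.enumerate_nil, List.foldl_append]

theorem buildLast_get? (stack : List Int) (x : Int) :
    (buildLast stack).get? x = (lastOcc stack x).map (fun k => (k : Int)) := by
  induction stack using List.reverseRecOn with
  | nil => simp [buildLast, PySem.List.enumerate_nil, lastOcc]
  | append_singleton l a ih =>
    rw [buildLast_append, lastOcc_append]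
    by_cases hax : a = x
    · subst hax
      rw [PySem.Dict.get?_insert_self]
      simp [lastOcc]
    · rw [PySem.Dict.get?_insert_of_ne _ _ (Ne.symm hax), ih]
      simp [lastOcc, hax]

-- the last occurrence of stack[j] in stack, expressed from position j
theorem lastOcc_at (stack : List Int) (j : Nat) (hj : j < stack.length) (e : Int)
    (he : stack[j] = e) :
    lastOcc stack e = some (j + qOf (stack.drop (j + 1)) e) := by
  have hsplit : stack = stack.take j ++ e :: stack.drop (j + 1) := by
    conv_lhs => rw [← List.take_append_drop j stack]
    rw [List.drop_eq_getElem_cons hj, he]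
  conv_lhs => rw [hsplit]
  rw [lastOcc_append, lastOcc_cons_self]
  simp [List.length_take, Nat.min_eq_left (Nat.le_of_lt hj)]

-- A's loop computes `greedy` on the unprocessed suffix
theorem aLoop_eq (fuel : Nat) : ∀ (suf pre : List Int), suf.length ≤ fuel →
    aLoop fuel (pre ++ suf) pre.length = pre ++ greedy suf := by
  induction fuel with
  | zero =>
    intro suf pre h
    have : suf = [] := List.eq_nil_of_length_eq_zero (Nat.le_zero.mp h)
    subst this
    simp [aLoop, greedy_nil]
  | succ fuel ih =>
    intro suf pre h
    cases suf with
    | nil => simp [aLoop, greedy_nil]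
    | cons x rest =>
      have hlen : pre.length < (pre ++ x :: rest).length := by simp
      have hget : PySem.List.pyGet? (pre ++ x :: rest) (pre.length : Int) = some x :=
        PySem.List.pyGet?_append_length pre rest x
      set q := qOf rest x with hq
      have hlofull : lastOcc (x :: rest) x = some q := lastOcc_cons_self x rest
      have hqle : q ≤ rest.length := by
        have := lastOcc_some (x :: rest) x q hlofull
        simp at this; omega
      have hrev : reversed_index (pre ++ x :: rest) x = some (rest.length - q) := by
        unfold reversed_index
        rw [List.reverse_append,
          PySem.List.index?_append_of_mem _ (by simp : x ∈ (x :: rest).reverse),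
          index?_reverse (x :: rest) x q hlofull]
        simp
      rw [aLoop]
      simp only [hlen, if_pos, hget, hrev]
      have hs1 : PySem.List.slice (pre ++ x :: rest) (some 0) (some (pre.length : Int)) = pre := by
        rw [PySem.List.slice_zero_start, PySem.List.slice_to_natCast, List.take_left]
      have hs2 : PySem.List.slice (pre ++ x :: rest)
          (some (((pre ++ x :: rest).length : Int) - ((rest.length - q : Nat) : Int))) none
          = rest.drop q := by
        have hcast : (((pre ++ x :: rest).length : Int) - ((rest.length - q : Nat) : Int))
            = ((pre.length + (1 + q) : Nat) : Int) := by
          simp; omega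
        have hsub : pre.length + (1 + q) - pre.length = q + 1 := by omega
        rw [hcast, PySem.List.slice_from_natCast, List.drop_append, hsub,
          List.drop_succ_cons, List.drop_of_length_le (by omega)]
        simp
      rw [hs1, hs2]
      have hpre : pre.length + 1 = (pre ++ [x]).length := by simp
      have hassoc : pre ++ [x] ++ rest.drop q = (pre ++ [x]) ++ rest.drop q := rfl
      rw [hassoc, hpre, ih (rest.drop q) (pre ++ [x]) (by simp at h ⊢; omega)]
      simp only [greedy_cons, List.append_assoc, List.singleton_append]
      rw [hq]

-- B's loop computes `greedy` on the unprocessed suffix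
theorem bLoop_eq (stack : List Int) (fuel : Nat) : ∀ (j : Nat) (acc : List Int),
    stack.length - j ≤ fuel →
    bLoop stack (buildLast stack) fuel (j : Int) acc = acc ++ greedy (stack.drop j) := by
  induction fuel with
  | zero =>
    intro j acc h
    have : stack.length ≤ j := by omega
    simp [bLoop, List.drop_of_length_le this, greedy_nil]
  | succ fuel ih =>
    intro j acc h
    by_cases hj : j < stack.length
    · have hget : PySem.List.pyGet? stack (j : Int) = some stack[j] := by
        rw [PySem.List.pyGet?_natCast, List.getElem?_eq_getElem hj]
      have hdict : (buildLast stack).get? stack[j]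
          = some ((j + qOf (stack.drop (j + 1)) stack[j] : Nat) : Int) := by
        rw [buildLast_get?, lastOcc_at stack j hj _ rfl]; simp
      have hcast : ((j + qOf (stack.drop (j + 1)) stack[j] : Nat) : Int) + 1
          = ((j + qOf (stack.drop (j + 1)) stack[j] + 1 : Nat) : Int) := by push_cast; ring
      rw [bLoop]
      simp only [hget, hdict]
      rw [if_pos (show (j : Int) < (stack.length : Int) by exact_mod_cast hj), hcast,
        ih _ (acc ++ [stack[j]]) (by omega)]
      rw [List.drop_eq_getElem_cons hj, greedy_cons]
      have harith : j + qOf (stack.drop (j + 1)) stack[j] + 1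
          = (j + 1) + qOf (stack.drop (j + 1)) stack[j] := by omega
      have hdd : List.drop ((j + 1) + qOf (stack.drop (j + 1)) stack[j]) stack
          = List.drop (qOf (stack.drop (j + 1)) stack[j]) (List.drop (j + 1) stack) := by
        rw [List.drop_drop]
      rw [harith, hdd]
      simp
    · rw [bLoop]
      rw [if_neg (show ¬ (j : Int) < (stack.length : Int) by exact_mod_cast hj)]
      rw [List.drop_of_length_le (by omega), greedy_nil, List.append_nil]

-- ===== VERDICT (by name: the statement is the Claim_ definition above) =====
theorem reduce_point_stack_spec : Claim_equal_reduce_point_stack := by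
  intro stack _
  unfold Spec_reduce_point_stack reduce_point_stack reduce_point_stack_alt
  cases stack with
  | nil => simp [aLoop]
  | cons s0 rest =>
    have hA : aLoop (s0 :: rest).length (s0 :: rest) 1 = [s0] ++ greedy rest := by
      have := aLoop_eq (s0 :: rest).length rest [s0] (by simp)
      simpa using this
    have hB : bLoop (s0 :: rest) (buildLast (s0 :: rest)) (s0 :: rest).length 1 [s0]
        = [s0] ++ greedy rest := by
      have := bLoop_eq (s0 :: rest) (s0 :: rest).length 1 [s0] (by simp)
      simpa using this
    simp only [hA, hB]
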